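-- pv_equiv track=rewrite | github.com/AdamZhouSE/pythonHomework | Code/CodeRecords/2387/59018/266141.py | sorts
-- ===== SOURCE A (Python) =====
-- def sorts(a,OP,L,R):
--     c=[]
--     d=[]
--     for j in range(len(a)):
--         if L<=a[j]<=R:
--             c.append(j)
--             d.append(a[j])
--     if OP==0:
--         d.sort()
--     else:
--         d.sort(reverse=True)
--     for j in c:
--         a[j]=d[0]
--         del d[0]
--     return a
-- ===== SOURCE B (Python) =====
-- def sorts(a, OP, L, R):
--     # rank placement: no sort call anywhere -- each in-range value is written
--     # directly to its final slot, found by counting (stable rank); mutates a in place like A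
--     slots = [j for j, x in enumerate(a) if L <= x <= R]
--     vals = [x for x in a if L <= x <= R]
--     for i, x in enumerate(vals):
--         if OP == 0:
--             r = sum(1 for i2, y in enumerate(vals) if y < x or (y == x and i2 < i))
--         else:
--             r = sum(1 for i2, y in enumerate(vals) if y > x or (y == x and i2 < i))
--         a[slots[r]] = x
--     return a
-- ===== Notes on version B (the rewrite author's own statement) =====
-- stated objective: alternative
-- what changed: B never sorts: instead of collecting positions, sorting the values and writing them back in order (A), B computes each in-range value's final slot directly by counting its stable rank (smaller values, or equal values with smaller index; reversed comparison when OP!=0) and writes it there in one scatter pass.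
import Mathlib
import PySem

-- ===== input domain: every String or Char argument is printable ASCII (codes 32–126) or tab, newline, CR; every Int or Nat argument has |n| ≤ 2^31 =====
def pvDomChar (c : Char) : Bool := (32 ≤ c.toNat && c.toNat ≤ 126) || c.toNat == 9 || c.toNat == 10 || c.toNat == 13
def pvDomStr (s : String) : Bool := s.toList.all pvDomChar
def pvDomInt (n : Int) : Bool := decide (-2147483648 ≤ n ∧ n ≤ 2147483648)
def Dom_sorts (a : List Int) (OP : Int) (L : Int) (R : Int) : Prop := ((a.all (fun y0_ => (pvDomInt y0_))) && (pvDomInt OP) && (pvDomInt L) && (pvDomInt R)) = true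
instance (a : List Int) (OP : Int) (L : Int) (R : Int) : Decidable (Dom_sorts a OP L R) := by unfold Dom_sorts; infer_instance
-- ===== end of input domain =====

-- B never sorts: it computes each in-range value's final slot directly by counting its
-- stable rank and writes it there in one scatter pass (objective: alternative algorithm).
-- Both Pythons mutate `a` in place; the equivalence proved here is about the RETURN value.

-- ===== PORT A =====
-- collect loop: a[j] read via pyGetD (j ∈ range(len a), so in range — exact);
-- writeback: a[j]=d[0] via pySetD/pyGetD, del d[0] = drop 1 (d nonempty at every step: len d = len c)
def sorts (a : List Int) (OP : Int) (L : Int) (R : Int) : List Int :=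
  let cd := (PySem.List.pyRange 0 a.length 1).foldl
      (fun (s : List Int × List Int) j =>
        let v := PySem.List.pyGetD a j 0
        if L ≤ v ∧ v ≤ R then (s.1 ++ [j], s.2 ++ [v]) else s)
      ([], [])
  let d := if OP = 0 then PySem.List.sorted cd.2 (fun x => x) false
           else PySem.List.sorted cd.2 (fun x => x) true
  let fin := cd.1.foldl
      (fun (s : List Int × List Int) j =>
        (PySem.List.pySetD s.1 j (PySem.List.pyGetD s.2 0 0), s.2.drop 1))
      (a, d)
  fin.1

-- ===== PORT B =====
-- slots/vals: the two comprehensions; the loop over enumerate(vals) computes the stable rank r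
-- of (x, i) by counting (sum of 1s = countP, exact) and writes x at a[slots[r]] (pySetD/pyGetD —
-- r and slots[r] are always in range)
def sorts_alt (a : List Int) (OP : Int) (L : Int) (R : Int) : List Int :=
  let slots := (PySem.List.enumerate a).filterMap
      (fun p => if L ≤ p.2 ∧ p.2 ≤ R then some p.1 else none)
  let vals := a.filter (fun x => decide (L ≤ x ∧ x ≤ R))
  (PySem.List.enumerate vals).foldl
    (fun acc p =>
      let r : Int :=
        if OP = 0 then
          ((PySem.List.enumerate vals).countP
            (fun q => decide (q.2 < p.2 ∨ (q.2 = p.2 ∧ q.1 < p.1))) : Nat)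
        else
          ((PySem.List.enumerate vals).countP
            (fun q => decide (p.2 < q.2 ∨ (q.2 = p.2 ∧ q.1 < p.1))) : Nat)
      PySem.List.pySetD acc (PySem.List.pyGetD slots r 0) p.2)
    a

-- ===== PRECONDITION & SPEC =====
def Spec_sorts (a : List Int) (OP : Int) (L : Int) (R : Int) (out : List Int) : Prop := out = sorts_alt a OP L R
instance (a : List Int) (OP : Int) (L : Int) (R : Int) (out : List Int) : Decidable (Spec_sorts a OP L R out) := by unfold Spec_sorts; infer_instance

-- ===== CLAIM (what is proved, stated in full; the proofs are below) =====
def Claim_equal_sorts : Prop := ∀ (a : List Int) (OP : Int) (L : Int) (R : Int), Dom_sorts a OP L R → Spec_sorts a OP L R (sorts a OP L R)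

-- ===== LEMMAS AND PROOFS =====

-- ---- shared proof devices ----

-- the indices of the in-range elements of `rest`, counted from k
def idxsFrom (L R : Int) : Int → List Int → List Int
  | _, [] => []
  | k, x :: xs => if L ≤ x ∧ x ≤ R then k :: idxsFrom L R (k + 1) xs else idxsFrom L R (k + 1) xs

-- the common normal form both ports are reduced to: the sorted values written
-- back into the in-range slots, front to back
def fillSorted (L R : Int) : List Int → List Int → List Int
  | [], _ => []
  | x :: xs, vs =>
    if L ≤ x ∧ x ≤ R then vs.headI :: fillSorted L R xs vs.tail
    else x :: fillSorted L R xs vs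

-- a scatter pass: write v at (Int) position p for each pair (p, v)
def scatterI (l : List (Int × Int)) (acc : List Int) : List Int :=
  l.foldl (fun acc p => PySem.List.pySetD acc p.1 p.2) acc

-- the stable rank of value x sitting at index i, under strict comparison cmp
def rankP (vals : List Int) (cmp : Int → Int → Prop) [DecidableRel cmp] (i : Int) (x : Int) : Nat :=
  (PySem.List.enumerate vals).countP (fun q => decide (cmp q.2 x ∨ (q.2 = x ∧ q.1 < i)))

-- ---- generic counting lemmas ----

lemma countP_strict {α : Type} (l : List α) (p q : α → Bool)
    (h : ∀ e ∈ l, p e = true → q e = true) (e₀ : α) (he : e₀ ∈ l)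
    (hq : q e₀ = true) (hp : p e₀ = false) : l.countP p < l.countP q := by
  induction l with
  | nil => simp at he
  | cons a t ih =>
    have hmono : t.countP p ≤ t.countP q :=
      List.countP_mono_left (fun x hx => h x (List.mem_cons_of_mem a hx))
    rcases List.mem_cons.1 he with rfl | he'
    · simp only [List.countP_cons, hp, hq, if_true, Bool.false_eq_true, if_false]
      omega
    · have := ih (fun e hx => h e (List.mem_cons_of_mem a hx)) he'
      have hq' : (if p a = true then 1 else 0) ≤ (if q a = true then 1 else 0) := by
        by_cases hpa : p a = true
        · simp [hpa, h a (List.mem_cons_self) hpa]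
        · simp [hpa]
      simp only [List.countP_cons]
      omega
lemma countP_or_disj {α : Type} (l : List α) (p q : α → Prop)
    [DecidablePred p] [DecidablePred q] (h : ∀ e ∈ l, ¬(p e ∧ q e)) :
    l.countP (fun e => decide (p e ∨ q e)) =
      l.countP (fun e => decide (p e)) + l.countP (fun e => decide (q e)) := by
  induction l with
  | nil => simp
  | cons a t ih =>
    have ha := h a (List.mem_cons_self)
    have := ih (fun e hx => h e (List.mem_cons_of_mem a hx))
    by_cases hpa : p a <;> by_cases hqa : q a <;>
      simp_all <;> omega
-- ---- the sorted-list characterisation: position r holds x iff r lies in x's count window ----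

lemma sorted_char (cmp : Int → Int → Prop) [DecidableRel cmp]
    (hirr : ∀ a : Int, ¬ cmp a a)
    (htrans : ∀ a b c : Int, cmp a b → cmp b c → cmp a c)
    (htot : ∀ a b : Int, ¬ cmp a b → ¬ cmp b a → a = b)
    (s : List Int) (hs : s.Pairwise (fun a b => ¬ cmp b a)) (x : Int) (r : Nat) (hr : r < s.length)
    (h1 : s.countP (fun y => decide (cmp y x)) ≤ r)
    (h2 : r < s.countP (fun y => decide (cmp y x ∨ y = x))) : s[r] = x := by
  have pg := List.pairwise_iff_getElem.1 hs
  by_cases hA : cmp s[r] x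
  · -- then every s[j], j ≤ r, satisfies cmp · x : count ≥ r+1, contradiction with h1
    exfalso
    have hall : ∀ y ∈ s.take (r+1), cmp y x := by
      intro y hy
      obtain ⟨j, hj, hyj⟩ := List.mem_iff_getElem.1 hy
      have hjr : j ≤ r := by simp at hj; omega
      have hjs : j < s.length := by omega
      rw [List.getElem_take] at hyj
      subst hyj
      rcases Nat.lt_or_ge j r with hlt | hge
      · -- j < r : pairwise gives ¬ cmp s[r] s[j]
        have hp := pg j r hjs hr hlt
        by_contra hc
        rcases Classical.em (cmp x s[j]) with hxj | hxj
        · exact hp (htrans _ _ _ hA hxj)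
        · have : s[j] = x := htot _ _ hc hxj
          rw [this] at hp; exact hp hA
      · have : j = r := by omega
        subst this; exact hA
    have hcnt : (s.take (r+1)).countP (fun y => decide (cmp y x)) = (s.take (r+1)).length :=
      List.countP_eq_length.2 (fun y hy => by simp [hall y hy])
    have hlen : (s.take (r+1)).length = r+1 := by simp; omega
    have : r + 1 ≤ s.countP (fun y => decide (cmp y x)) := by
      calc r + 1 = (s.take (r+1)).countP (fun y => decide (cmp y x)) := by rw [hcnt, hlen]
      _ ≤ s.countP (fun y => decide (cmp y x)) := (List.take_sublist _ _).countP_le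
    omega
  · by_cases hB : cmp x s[r]
    · -- everything at index ≥ r fails (cmp · x ∨ · = x): count ≤ r, contradiction with h2
      exfalso
      have hdrop : (s.drop r).countP (fun y => decide (cmp y x ∨ y = x)) = 0 := by
        refine List.countP_eq_zero.2 ?_
        intro y hy
        obtain ⟨m, hm, hym⟩ := List.mem_iff_getElem.1 hy
        rw [List.getElem_drop] at hym
        subst hym
        simp only [decide_eq_true_eq]
        rintro (hc | hc)
        · rcases Nat.eq_or_lt_of_le (Nat.zero_le m) with hm0 | hm0
          · subst hm0
            simp only [Nat.add_zero] at hc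
            exact hirr _ (htrans _ _ _ hc hB)
          · have hp := pg r (r+m) hr (by simp at hm; omega) (by omega)
            exact hp (htrans _ _ _ hc hB)
        · rcases Nat.eq_or_lt_of_le (Nat.zero_le m) with hm0 | hm0
          · subst hm0
            simp only [Nat.add_zero] at hc
            rw [hc] at hB
            exact hirr _ hB
          · have hp := pg r (r+m) hr (by simp at hm; omega) (by omega)
            rw [hc] at hp
            exact hp hB
      have hsplit := List.countP_append (p := fun y => decide (cmp y x ∨ y = x))
          (l₁ := s.take r) (l₂ := s.drop r)
      rw [List.take_append_drop] at hsplit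
      have htk : (s.take r).countP (fun y => decide (cmp y x ∨ y = x)) ≤ r := by
        calc _ ≤ (s.take r).length := List.countP_le_length
        _ ≤ r := by simp
      omega
    · exact htot _ _ hA hB
-- ---- rank bounds and the main rank lemma ----

lemma countP_enumerate_snd (vals : List Int) (f : Int → Bool) (s : Int) :
    (PySem.List.enumerate vals s).countP (fun q => f q.2) = vals.countP f := by
  conv_rhs => rw [← PySem.List.map_snd_enumerate vals s]
  rw [List.countP_map]
  rfl

lemma rank_lb (vals : List Int) (cmp : Int → Int → Prop) [DecidableRel cmp] (i x : Int) :
    vals.countP (fun y => decide (cmp y x)) ≤ rankP vals cmp i x := by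
  rw [← countP_enumerate_snd vals _ 0]
  exact List.countP_mono_left (fun q _ hq => by
    simp only [decide_eq_true_eq] at hq ⊢
    exact Or.inl hq)
lemma rank_ub (vals : List Int) (cmp : Int → Int → Prop) [DecidableRel cmp]
    (hirr : ∀ a : Int, ¬ cmp a a) (k : Nat) (hk : k < vals.length) :
    rankP vals cmp (k : Int) vals[k] < vals.countP (fun y => decide (cmp y vals[k] ∨ y = vals[k])) := by
  rw [← countP_enumerate_snd vals _ 0]
  refine countP_strict _ _ _ ?_ ((k : Int), vals[k]) ?_ ?_ ?_
  · intro e _ hp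
    simp only [decide_eq_true_eq] at hp ⊢
    rcases hp with h | ⟨h, _⟩
    · exact Or.inl h
    · exact Or.inr h
  · rw [PySem.List.mem_enumerate_iff]
    exact ⟨k, hk, by simp⟩
  · simp
  · simp only [decide_eq_false_iff_not]
    rintro (h | ⟨_, h⟩)
    · exact hirr _ h
    · omega
lemma rank_get (cmp : Int → Int → Prop) [DecidableRel cmp]
    (hirr : ∀ a : Int, ¬ cmp a a)
    (htrans : ∀ a b c : Int, cmp a b → cmp b c → cmp a c)
    (htot : ∀ a b : Int, ¬ cmp a b → ¬ cmp b a → a = b)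
    (vals s : List Int) (hperm : s.Perm vals) (hs : s.Pairwise (fun a b => ¬ cmp b a))
    (k : Nat) (hk : k < vals.length) :
    rankP vals cmp (k : Int) vals[k] < s.length ∧
      s.getD (rankP vals cmp (k : Int) vals[k]) 0 = vals[k] := by
  have hub := rank_ub vals cmp hirr k hk
  have hlb := rank_lb vals cmp (k : Int) vals[k]
  have hc1 : s.countP (fun y => decide (cmp y vals[k])) = vals.countP (fun y => decide (cmp y vals[k])) :=
    hperm.countP_eq _
  have hc2 : s.countP (fun y => decide (cmp y vals[k] ∨ y = vals[k])) =
      vals.countP (fun y => decide (cmp y vals[k] ∨ y = vals[k])) := hperm.countP_eq _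
  have hrlen : rankP vals cmp (k : Int) vals[k] < s.length := by
    have := List.countP_le_length (p := fun y => decide (cmp y vals[k] ∨ y = vals[k])) (l := s)
    omega
  refine ⟨hrlen, ?_⟩
  rw [List.getD_eq_getElem _ _ hrlen]
  exact sorted_char cmp hirr htrans htot s hs vals[k] _ hrlen (by omega) (by omega)
lemma rank_lt_same (vals : List Int) (cmp : Int → Int → Prop) [DecidableRel cmp]
    (hirr : ∀ a : Int, ¬ cmp a a) (k k' : Nat) (hk : k < vals.length) (hkk : k < k') (x : Int)
    (hx : vals[k] = x) :
    rankP vals cmp (k : Int) x < rankP vals cmp (k' : Int) x := by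
  unfold rankP
  have hdisj : ∀ (i : Int), ∀ e ∈ PySem.List.enumerate vals 0,
      ¬(cmp e.2 x ∧ (e.2 = x ∧ e.1 < i)) := by
    rintro i e _ ⟨h1, h2, _⟩
    rw [h2] at h1
    exact hirr _ h1
  rw [countP_or_disj _ _ _ (hdisj (k : Int)), countP_or_disj _ _ _ (hdisj (k' : Int))]
  have hstrict : (PySem.List.enumerate vals).countP (fun q => decide (q.2 = x ∧ q.1 < (k : Int))) <
      (PySem.List.enumerate vals).countP (fun q => decide (q.2 = x ∧ q.1 < (k' : Int))) := by
    refine countP_strict _ _ _ ?_ ((k : Int), x) ?_ ?_ ?_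
    · intro e _ hp
      simp only [decide_eq_true_eq] at hp ⊢
      exact ⟨hp.1, by omega⟩
    · rw [PySem.List.mem_enumerate_iff]
      exact ⟨k, hk, by simp [hx]⟩
    · simp; omega
    · simp
  omega
lemma rank_inj (cmp : Int → Int → Prop) [DecidableRel cmp]
    (hirr : ∀ a : Int, ¬ cmp a a)
    (htrans : ∀ a b c : Int, cmp a b → cmp b c → cmp a c)
    (htot : ∀ a b : Int, ¬ cmp a b → ¬ cmp b a → a = b)
    (vals s : List Int) (hperm : s.Perm vals) (hs : s.Pairwise (fun a b => ¬ cmp b a))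
    (k k' : Nat) (hk : k < vals.length) (hk' : k' < vals.length) (hne : k ≠ k') :
    rankP vals cmp (k : Int) vals[k] ≠ rankP vals cmp (k' : Int) vals[k'] := by
  by_cases hv : vals[k] = vals[k']
  · rcases Nat.lt_or_ge k k' with h | h
    · exact Nat.ne_of_lt (by simpa [hv] using rank_lt_same vals cmp hirr k k' hk h vals[k'] hv)
    · have hkk : k' < k := by omega
      exact (Nat.ne_of_lt (by simpa [hv] using rank_lt_same vals cmp hirr k' k hk' hkk vals[k'] rfl)).symm
  · intro heq
    have h1 := rank_get cmp hirr htrans htot vals s hperm hs k hk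
    have h2 := rank_get cmp hirr htrans htot vals s hperm hs k' hk'
    rw [heq] at h1
    rw [h1.2] at h2
    exact hv h2.2
-- ---- the rank pairs are a permutation of the enumerated sorted list ----

lemma epairs_perm (cmp : Int → Int → Prop) [DecidableRel cmp]
    (hirr : ∀ a : Int, ¬ cmp a a)
    (htrans : ∀ a b c : Int, cmp a b → cmp b c → cmp a c)
    (htot : ∀ a b : Int, ¬ cmp a b → ¬ cmp b a → a = b)
    (vals s : List Int) (hperm : s.Perm vals) (hs : s.Pairwise (fun a b => ¬ cmp b a)) :
    ((PySem.List.enumerate vals).map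
        (fun p => ((rankP vals cmp p.1 p.2 : Int), p.2))).Perm (PySem.List.enumerate s) := by
  have hnodup : (PySem.List.enumerate vals).Nodup :=
    (PySem.List.pairwise_lt_enumerate vals 0).imp (fun h => by
      intro heq; rw [heq] at h; exact lt_irrefl _ h)
  have hmapnodup : ((PySem.List.enumerate vals).map
      (fun p => ((rankP vals cmp p.1 p.2 : Int), p.2))).Nodup := by
    refine List.Nodup.map_on ?_ hnodup
    intro p hp q hq heq
    rw [PySem.List.mem_enumerate_iff] at hp hq
    obtain ⟨k, hk, rfl⟩ := hp
    obtain ⟨k', hk', rfl⟩ := hq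
    simp only [zero_add, Prod.mk.injEq, Int.natCast_inj] at heq ⊢
    by_cases hkk : k = k'
    · subst hkk; exact ⟨rfl, rfl⟩
    · exfalso
      exact rank_inj cmp hirr htrans htot vals s hperm hs k k' hk hk' hkk
        (by exact_mod_cast heq.1)
  have hsub : ((PySem.List.enumerate vals).map
      (fun p => ((rankP vals cmp p.1 p.2 : Int), p.2))) ⊆ PySem.List.enumerate s := by
    intro r hr
    rw [List.mem_map] at hr
    obtain ⟨p, hp, rfl⟩ := hr
    rw [PySem.List.mem_enumerate_iff] at hp
    obtain ⟨k, hk, rfl⟩ := hp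
    simp only [zero_add]
    have hg := rank_get cmp hirr htrans htot vals s hperm hs k hk
    rw [PySem.List.mem_enumerate_iff]
    refine ⟨rankP vals cmp (k : Int) vals[k], hg.1, ?_⟩
    rw [← List.getD_eq_getElem s 0 hg.1, hg.2]
    simp
  have hlen : (PySem.List.enumerate s).length ≤
      ((PySem.List.enumerate vals).map
        (fun p => ((rankP vals cmp p.1 p.2 : Int), p.2))).length := by
    simp [PySem.List.length_enumerate, hperm.length_eq]
  exact (hmapnodup.subperm hsub).perm_of_length_le hlen
-- ---- zip form of the ordered write list ----

lemma map_enumerate_zip (slots : List Int) (s : List Int) (h : slots.length = s.length) :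
    (PySem.List.enumerate s).map (fun q => (PySem.List.pyGetD slots q.1 0, q.2)) = slots.zip s := by
  apply List.ext_getElem
  · simp [PySem.List.length_enumerate, List.length_zip, h]
  · intro i h₁ h₂
    have hi : i < s.length := by simpa [PySem.List.length_enumerate] using h₁
    have hie : i < (PySem.List.enumerate s).length := by simpa [PySem.List.length_enumerate] using hi
    rw [List.getElem_map, List.getElem_zip]
    rw [PySem.List.getElem_enumerate s 0 i hie]
    simp only [zero_add]
    rw [PySem.List.pyGetD_natCast, List.getD_eq_getElem _ _ (by omega : i < slots.length)]
-- ---- scatter is invariant under permuting writes to distinct nonnegative positions ----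

lemma scatterI_perm : ∀ {l₁ l₂ : List (Int × Int)}, l₁.Perm l₂ →
    (∀ p ∈ l₂, 0 ≤ p.1) → l₂.Pairwise (fun p q => p.1 ≠ q.1) →
    ∀ acc, scatterI l₁ acc = scatterI l₂ acc := by
  intro l₁ l₂ h
  induction h with
  | nil => intro _ _ acc; rfl
  | cons x h ih =>
    intro hnn hne acc
    simp only [scatterI, List.foldl_cons]
    exact ih (fun p hp => hnn p (List.mem_cons_of_mem x hp)) (List.Pairwise.sublist (List.sublist_cons_self x _) hne) _
  | swap x y l =>
    intro hnn hne acc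
    have hxy : x.1 ≠ y.1 := (List.pairwise_cons.1 hne).1 y (List.mem_cons_self)
    have hx : 0 ≤ x.1 := hnn x (List.mem_cons_self)
    have hy : 0 ≤ y.1 := hnn y (List.mem_cons_of_mem x (List.mem_cons_self))
    simp only [scatterI, List.foldl_cons]
    congr 1
    rw [PySem.List.pySetD_of_nonneg _ _ hx, PySem.List.pySetD_of_nonneg _ _ hy,
        PySem.List.pySetD_of_nonneg _ _ hx, PySem.List.pySetD_of_nonneg _ _ hy]
    exact List.set_comm _ _ (by omega)
  | trans h₁ h₂ ih₁ ih₂ =>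
    intro hnn hne acc
    rw [ih₁ (fun p hp => hnn p (h₂.subset hp))
         ((h₂.pairwise_iff (fun hab => Ne.symm hab)).2 hne) acc, ih₂ hnn hne acc]
-- ---- idxsFrom facts ----

lemma idxsFrom_ge (L R : Int) : ∀ (rest : List Int) (k : Int), ∀ j ∈ idxsFrom L R k rest, k ≤ j := by
  intro rest
  induction rest with
  | nil => intro k j hj; simp [idxsFrom] at hj
  | cons x xs ih =>
    intro k j hj
    by_cases hx : L ≤ x ∧ x ≤ R
    · simp only [idxsFrom, if_pos hx, List.mem_cons] at hj
      rcases hj with rfl | hj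
      · exact le_refl _
      · have := ih (k+1) j hj; omega
    · simp only [idxsFrom, if_neg hx] at hj
      have := ih (k+1) j hj; omega
lemma idxsFrom_pairwise (L R : Int) : ∀ (rest : List Int) (k : Int),
    (idxsFrom L R k rest).Pairwise (· < ·) := by
  intro rest
  induction rest with
  | nil => intro k; simp [idxsFrom]
  | cons x xs ih =>
    intro k
    by_cases hx : L ≤ x ∧ x ≤ R
    · simp only [idxsFrom, if_pos hx]
      exact List.Pairwise.cons (fun j hj => by have := idxsFrom_ge L R xs (k+1) j hj; omega) (ih (k+1))
    · simp only [idxsFrom, if_neg hx]; exact ih (k+1)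
lemma idxsFrom_length (L R : Int) : ∀ (rest : List Int) (k : Int),
    (idxsFrom L R k rest).length = rest.countP (fun x => decide (L ≤ x ∧ x ≤ R)) := by
  intro rest
  induction rest with
  | nil => intro k; simp [idxsFrom]
  | cons x xs ih =>
    intro k
    by_cases hx : L ≤ x ∧ x ≤ R <;>
      simp [idxsFrom, hx, ih (k+1)]
lemma filterMap_enumerate_idxs (L R : Int) : ∀ (xs : List Int) (k : Int),
    (PySem.List.enumerate xs k).filterMap
        (fun p => if L ≤ p.2 ∧ p.2 ≤ R then some p.1 else none) = idxsFrom L R k xs := by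
  intro xs
  induction xs with
  | nil => intro k; simp [PySem.List.enumerate, idxsFrom]
  | cons x t ih =>
    intro k
    rw [PySem.List.enumerate_cons]
    by_cases hx : L ≤ x ∧ x ≤ R <;>
      simp [hx, idxsFrom, ih (k+1)]
-- ---- the ordered scatter is the fill ----

lemma scatter_fill (L R : Int) : ∀ (rest pre s : List Int),
    s.length = rest.countP (fun x => decide (L ≤ x ∧ x ≤ R)) →
    scatterI ((idxsFrom L R pre.length rest).zip s) (pre ++ rest) = pre ++ fillSorted L R rest s := by
  intro rest
  induction rest with
  | nil => intro pre s h; simp [idxsFrom, fillSorted, scatterI]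
  | cons x xs ih =>
    intro pre s h
    by_cases hx : L ≤ x ∧ x ≤ R
    · rw [List.countP_cons] at h
      simp only [hx] at h
      cases s with
      | nil => simp at h
      | cons v s' =>
        simp only [idxsFrom, if_pos hx, List.zip_cons_cons]
        simp only [scatterI, List.foldl_cons]
        have hset : PySem.List.pySetD (pre ++ x :: xs) (pre.length : Int) v = pre ++ v :: xs := by
          rw [PySem.List.pySetD_natCast, List.set_append_right _ _ (le_refl _)]
          simp
        rw [hset]
        have hlen : ((pre ++ [v]).length : Int) = (pre.length : Int) + 1 := by simp
        have := ih (pre ++ [v]) s' (by simp at h ⊢; omega)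
        rw [hlen] at this
        rw [show pre ++ v :: xs = (pre ++ [v]) ++ xs by simp]
        simp only [scatterI] at this
        rw [this]
        simp [fillSorted, hx]
    · rw [List.countP_cons] at h
      simp only [hx, decide_false] at h
      simp only [idxsFrom, if_neg hx]
      have hlen : ((pre ++ [x]).length : Int) = (pre.length : Int) + 1 := by simp
      have := ih (pre ++ [x]) s (by simpa using h)
      rw [hlen] at this
      rw [show pre ++ x :: xs = (pre ++ [x]) ++ xs by simp, this]
      simp [fillSorted, hx]
-- ---- A's two loops (as in the port) reduced to the fill ----

lemma collect_loop (L R : Int) (a : List Int) :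
    ∀ (rest pre : List Int), a = pre ++ rest → ∀ (c0 d0 : List Int),
    (PySem.List.pyRange pre.length a.length 1).foldl
      (fun (s : List Int × List Int) j =>
        let v := PySem.List.pyGetD a j 0
        if L ≤ v ∧ v ≤ R then (s.1 ++ [j], s.2 ++ [v]) else s)
      (c0, d0)
    = (c0 ++ idxsFrom L R pre.length rest,
       d0 ++ rest.filter fun x => decide (L ≤ x ∧ x ≤ R)) := by
  intro rest
  induction rest with
  | nil =>
    intro pre h c0 d0
    simp [h, idxsFrom, PySem.List.pyRange_one_eq_nil]
  | cons x xs ih =>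
    intro pre h c0 d0
    have hlt : (pre.length : Int) < (a.length : Int) := by
      simp [h]
    rw [PySem.List.pyRange_one_cons hlt]
    have hget : PySem.List.pyGetD a (pre.length : Int) 0 = x := by
      rw [PySem.List.pyGetD_natCast]
      simp [h, List.getD_eq_getElem?_getD]
    have hpre : a = (pre ++ [x]) ++ xs := by simp [h]
    have hlen : ((pre ++ [x]).length : Int) = (pre.length : Int) + 1 := by simp
    simp only [List.foldl_cons, hget]
    by_cases hx : L ≤ x ∧ x ≤ R
    · simp only [hx, idxsFrom]
      rw [← hlen, ih (pre ++ [x]) hpre]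
      simp [hx]
    · simp only [hx, idxsFrom]
      rw [← hlen, ih (pre ++ [x]) hpre]
      simp [hx]

lemma writeback_loop (L R : Int) :
    ∀ (rest pre d : List Int),
    (idxsFrom L R pre.length rest).foldl
      (fun (s : List Int × List Int) j =>
        (PySem.List.pySetD s.1 j (PySem.List.pyGetD s.2 0 0), s.2.drop 1))
      (pre ++ rest, d)
    = (pre ++ fillSorted L R rest d,
       d.drop (rest.countP fun x => decide (L ≤ x ∧ x ≤ R))) := by
  intro rest
  induction rest with
  | nil => intro pre d; simp [idxsFrom, fillSorted]
  | cons x xs ih =>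
    intro pre d
    by_cases hx : L ≤ x ∧ x ≤ R
    · simp only [idxsFrom, if_pos hx, List.foldl_cons]
      have hset : PySem.List.pySetD (pre ++ x :: xs) (pre.length : Int)
          (PySem.List.pyGetD d 0 0) = pre ++ PySem.List.pyGetD d 0 0 :: xs := by
        rw [PySem.List.pySetD_natCast]
        rw [List.set_append_right _ _ (le_refl _)]
        simp
      have hhead : PySem.List.pyGetD d 0 0 = d.headI := by
        cases d <;> simp [PySem.List.pyGetD_zero, List.headI]
      have hlen : ((pre ++ [d.headI]).length : Int) = (pre.length : Int) + 1 := by simp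
      rw [hset, hhead]
      have := ih (pre ++ [d.headI]) (d.drop 1)
      rw [hlen] at this
      rw [show pre ++ d.headI :: xs = (pre ++ [d.headI]) ++ xs by simp, this]
      cases d with
      | nil => simp [fillSorted, hx]
      | cons dh dt => simp [fillSorted, hx]
    · simp only [idxsFrom, if_neg hx]
      have := ih (pre ++ [x]) d
      have hlen : ((pre ++ [x]).length : Int) = (pre.length : Int) + 1 := by simp
      rw [hlen] at this
      rw [show pre ++ x :: xs = (pre ++ [x]) ++ xs by simp, this]
      simp [fillSorted, hx]

lemma sorts_eq_fill (a : List Int) (OP L R : Int) :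
    sorts a OP L R = fillSorted L R a
      (PySem.List.sorted (a.filter fun x => decide (L ≤ x ∧ x ≤ R)) (fun x => x)
        (decide (OP ≠ 0))) := by
  unfold sorts
  have hc := collect_loop L R a a [] (by simp) [] []
  simp only [List.length_nil, Nat.cast_zero] at hc
  rw [hc]
  have hw := writeback_loop L R a []
  simp only [List.length_nil, Nat.cast_zero, List.nil_append] at hw ⊢
  rw [hw]
  by_cases hOP : OP = 0 <;> simp [hOP]

-- ---- B reduced to the fill ----

lemma scatter_rank_eq (cmp : Int → Int → Prop) [DecidableRel cmp]
    (hirr : ∀ a : Int, ¬ cmp a a)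
    (htrans : ∀ a b c : Int, cmp a b → cmp b c → cmp a c)
    (htot : ∀ a b : Int, ¬ cmp a b → ¬ cmp b a → a = b)
    (vals s J : List Int) (hperm : s.Perm vals) (hs : s.Pairwise (fun a b => ¬ cmp b a))
    (hJlen : J.length = s.length) (hJnn : ∀ j ∈ J, 0 ≤ j) (hJne : J.Pairwise (· ≠ ·))
    (a0 : List Int) :
    (PySem.List.enumerate vals).foldl
      (fun acc p =>
        PySem.List.pySetD acc
          (PySem.List.pyGetD J ((rankP vals cmp p.1 p.2 : Nat) : Int) 0) p.2) a0
    = scatterI (J.zip s) a0 := by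
  have hfold : (PySem.List.enumerate vals).foldl
      (fun acc p =>
        PySem.List.pySetD acc
          (PySem.List.pyGetD J ((rankP vals cmp p.1 p.2 : Nat) : Int) 0) p.2) a0
      = scatterI (((PySem.List.enumerate vals).map
          (fun p => ((rankP vals cmp p.1 p.2 : Int), p.2))).map
            (fun q => (PySem.List.pyGetD J q.1 0, q.2))) a0 := by
    unfold scatterI
    rw [List.map_map, List.foldl_map]
    rfl
  rw [hfold]
  have hzip : (PySem.List.enumerate s).map
      (fun q => (PySem.List.pyGetD J q.1 0, q.2)) = J.zip s :=
    map_enumerate_zip J s hJlen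
  have hpermpairs := (epairs_perm cmp hirr htrans htot vals s hperm hs).map
      (fun q => (PySem.List.pyGetD J q.1 0, q.2))
  rw [hzip] at hpermpairs
  refine scatterI_perm hpermpairs ?_ ?_ _
  · intro p hp
    exact hJnn p.1 (List.of_mem_zip hp).1
  · have hfst : (J.zip s).map Prod.fst = J := List.map_fst_zip (by omega)
    have := hJne
    rw [← hfst, List.pairwise_map] at this
    exact this

lemma sorts_alt_eq_fill (a : List Int) (OP L R : Int) :
    sorts_alt a OP L R = fillSorted L R a
      (PySem.List.sorted (a.filter fun x => decide (L ≤ x ∧ x ≤ R)) (fun x => x)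
        (decide (OP ≠ 0))) := by
  unfold sorts_alt
  rw [filterMap_enumerate_idxs L R a 0]
  have hJlen0 : (idxsFrom L R 0 a).length =
      (a.filter fun x => decide (L ≤ x ∧ x ≤ R)).length := by
    rw [idxsFrom_length, List.countP_eq_length_filter]
  have hJnn : ∀ j ∈ idxsFrom L R 0 a, 0 ≤ j := idxsFrom_ge L R a 0
  have hJne : (idxsFrom L R 0 a).Pairwise (· ≠ ·) :=
    (idxsFrom_pairwise L R a 0).imp (fun h => ne_of_lt h)
  have hfill := scatter_fill L R a [] ; simp only [List.length_nil, Nat.cast_zero,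
    List.nil_append] at hfill
  by_cases hOP : OP = 0
  · simp only [hOP, decide_not, if_pos]
    have hsort : (decide ((0:Int) ≠ 0)) = false := by decide
    rw [hOP] at *
    set vals := a.filter (fun x => decide (L ≤ x ∧ x ≤ R)) with hvals
    set s := PySem.List.sorted vals (fun x => x) (decide ((0:Int) ≠ 0)) with hsdef
    have hsS : s = PySem.List.sorted vals (fun x => x) false := by rw [hsdef, hsort]
    have hperm : s.Perm vals := PySem.List.sorted_perm vals (fun x => x) _
    have hs : s.Pairwise (fun a b => ¬ (fun y x : Int => y < x) b a) := by
      rw [hsS]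
      exact (PySem.List.sorted_pairwise vals (fun x => x)).imp (fun h => not_lt.mpr h)
    have hJlen : (idxsFrom L R 0 a).length = s.length := by
      rw [hJlen0, hperm.length_eq]
    have hkey := scatter_rank_eq (fun y x : Int => y < x)
      (fun a => lt_irrefl a) (fun a b c hab hbc => lt_trans hab hbc)
      (fun a b h1 h2 => by omega)
      vals s (idxsFrom L R 0 a) hperm hs hJlen hJnn hJne a
    have hrw : (fun (acc : List Int) (p : Int × Int) =>
        PySem.List.pySetD acc
          (PySem.List.pyGetD (idxsFrom L R 0 a)
            (((PySem.List.enumerate vals).countP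
              (fun q => decide (q.2 < p.2 ∨ (q.2 = p.2 ∧ q.1 < p.1))) : Nat) : Int) 0) p.2)
      = (fun (acc : List Int) (p : Int × Int) =>
        PySem.List.pySetD acc
          (PySem.List.pyGetD (idxsFrom L R 0 a)
            ((rankP vals (fun y x : Int => y < x) p.1 p.2 : Nat) : Int) 0) p.2) := rfl
    rw [hrw] at *
    rw [hkey]
    exact hfill s (by rw [hperm.length_eq, hvals, List.countP_eq_length_filter])
  · simp only [hOP, if_false]
    have hsort : (decide (OP ≠ 0)) = true := by simp [hOP]
    set vals := a.filter (fun x => decide (L ≤ x ∧ x ≤ R)) with hvals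
    set s := PySem.List.sorted vals (fun x => x) (decide (OP ≠ 0)) with hsdef
    have hsS : s = PySem.List.sorted vals (fun x => x) true := by rw [hsdef, hsort]
    have hperm : s.Perm vals := PySem.List.sorted_perm vals (fun x => x) _
    have hs : s.Pairwise (fun a b => ¬ (fun y x : Int => x < y) b a) := by
      rw [hsS]
      exact (PySem.List.sorted_pairwise_rev vals (fun x => x)).imp (fun h => not_lt.mpr h)
    have hJlen : (idxsFrom L R 0 a).length = s.length := by
      rw [hJlen0, hperm.length_eq]
    have hkey := scatter_rank_eq (fun y x : Int => x < y)
      (fun a => lt_irrefl a) (fun a b c hab hbc => lt_trans hbc hab)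
      (fun a b h1 h2 => by omega)
      vals s (idxsFrom L R 0 a) hperm hs hJlen hJnn hJne a
    have hrw : (fun (acc : List Int) (p : Int × Int) =>
        PySem.List.pySetD acc
          (PySem.List.pyGetD (idxsFrom L R 0 a)
            (((PySem.List.enumerate vals).countP
              (fun q => decide (p.2 < q.2 ∨ (q.2 = p.2 ∧ q.1 < p.1))) : Nat) : Int) 0) p.2)
      = (fun (acc : List Int) (p : Int × Int) =>
        PySem.List.pySetD acc
          (PySem.List.pyGetD (idxsFrom L R 0 a)
            ((rankP vals (fun y x : Int => x < y) p.1 p.2 : Nat) : Int) 0) p.2) := rfl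
    rw [hrw] at *
    rw [hkey]
    exact hfill s (by rw [hperm.length_eq, hvals, List.countP_eq_length_filter])

-- ===== VERDICT (by name: the statement is the Claim_ definition above) =====
theorem sorts_spec : Claim_equal_sorts := by
  intro a OP L R _
  show sorts a OP L R = sorts_alt a OP L R
  rw [sorts_eq_fill, sorts_alt_eq_fill]
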